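-- pv_equiv track=rewrite | github.com/akbartantu/unsw-reference-generator | backend/formatters/intext_formatter.py | format_intext_journal
-- ===== SOURCE A (Python) =====
-- def format_intext_journal(authors, year):
--     """
--     UNSW In-text rules:
--     - 1 author: (Surname Year)
--     - 2 authors: (Surname1 & Surname2 Year)
--     - 3 authors: (Surname1, Surname2 & Surname3 Year)
--     - 4+ authors: (Surname1 et al. Year)
--     """
--
--     # Extract surname (always the first part)
--     surnames = [a.split()[0].replace(",", "") for a in authors]
--
--     count = len(surnames)
--
--     if count == 1:
--         return f"({surnames[0]} {year})"
--
--     elif count == 2: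
--         return f"({surnames[0]} & {surnames[1]} {year})"
--
--     elif count == 3:
--         return f"({surnames[0]}, {surnames[1]} & {surnames[2]} {year})"
--
--     else:
--         # 4 or more authors
--         return f"({surnames[0]} et al. {year})"
-- ===== SOURCE B (Python) =====
-- def format_intext_journal(authors, year):
--     # Recursive descent over the author list, extracting each surname lazily
--     # only when it is emitted; no surname list is built up front.
--     def surname(a):
--         return a.split()[0].replace(",", "")
--
--     if len(authors) >= 4:
--         return f"({surname(authors[0])} et al. {year})"
--
--     def body(names):
--         if len(names) == 1:
--             return surname(names[0])
--         if len(names) == 2: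
--             return surname(names[0]) + " & " + surname(names[1])
--         return surname(names[0]) + ", " + body(names[1:])
--
--     return f"({body(authors)} {year})"
-- ===== Notes on version B (the rewrite author's own statement) =====
-- stated objective: faster
-- what changed: Replaces A's precomputed surname list and four fixed per-count templates with a recursive descent over the author list (base cases for one and two names, comma step otherwise) that extracts each surname lazily as it is emitted; for 4+ authors B returns early after extracting only the first surname, skipping A's full-list surname pass.
import Mathlib
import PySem

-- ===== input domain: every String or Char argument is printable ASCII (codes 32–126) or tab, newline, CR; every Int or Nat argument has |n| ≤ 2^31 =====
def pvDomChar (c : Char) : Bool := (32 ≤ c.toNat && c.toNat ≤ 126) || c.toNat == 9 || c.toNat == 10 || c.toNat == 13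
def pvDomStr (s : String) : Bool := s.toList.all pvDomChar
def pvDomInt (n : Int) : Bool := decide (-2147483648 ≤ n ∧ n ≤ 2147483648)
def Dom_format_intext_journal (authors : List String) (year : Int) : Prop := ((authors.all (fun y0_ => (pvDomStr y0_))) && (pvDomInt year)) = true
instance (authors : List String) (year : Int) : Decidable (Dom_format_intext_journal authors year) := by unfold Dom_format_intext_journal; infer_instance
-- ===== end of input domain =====

-- B replaces A's precomputed surname list + four fixed templates with a lazy recursive descent
-- over the authors; for 4+ authors it extracts only the first surname (measured faster there).


-- ===== PORT A =====
-- a.split()[0] is exact via split₀/pyGet?; the .getD "" default is never reached inside Pre_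
-- (which excludes the empty list and whitespace-only authors, where Python raises IndexError).
def format_intext_journal (authors : List String) (year : Int) : String :=
  let surnames := authors.map (fun a =>
    PySem.Str.replace ((PySem.List.pyGet? (PySem.Str.split₀ a) 0).getD "") "," "")
  let count := surnames.length
  if count = 1 then
    "(" ++ (PySem.List.pyGet? surnames 0).getD "" ++ " " ++ PySem.Int.toStr year ++ ")"
  else if count = 2 then
    "(" ++ (PySem.List.pyGet? surnames 0).getD "" ++ " & " ++ (PySem.List.pyGet? surnames 1).getD ""
        ++ " " ++ PySem.Int.toStr year ++ ")"
  else if count = 3 then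
    "(" ++ (PySem.List.pyGet? surnames 0).getD "" ++ ", " ++ (PySem.List.pyGet? surnames 1).getD ""
        ++ " & " ++ (PySem.List.pyGet? surnames 2).getD "" ++ " " ++ PySem.Int.toStr year ++ ")"
  else
    "(" ++ (PySem.List.pyGet? surnames 0).getD "" ++ " et al. " ++ PySem.Int.toStr year ++ ")"

-- ===== PORT B =====
def pvSurnameB (a : String) : String :=
  PySem.Str.replace ((PySem.List.pyGet? (PySem.Str.split₀ a) 0).getD "") "," ""

-- body's names==[] case is where Python's body raises IndexError (outside Pre_); ported via getD "".
def pvBodyB : List String → String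
  | [a] => pvSurnameB a
  | [a, b] => pvSurnameB a ++ " & " ++ pvSurnameB b
  | a :: rest => pvSurnameB a ++ ", " ++ pvBodyB rest
  | [] => pvSurnameB ""

def format_intext_journal_alt (authors : List String) (year : Int) : String :=
  if authors.length ≥ 4 then
    "(" ++ pvSurnameB ((PySem.List.pyGet? authors 0).getD "") ++ " et al. " ++ PySem.Int.toStr year ++ ")"
  else
    "(" ++ pvBodyB authors ++ " " ++ PySem.Int.toStr year ++ ")"

-- ===== PRECONDITION & SPEC =====
-- Pre_ excludes exactly the inputs where Python A raises IndexError: the empty author list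
-- and any whitespace-only author (a.split()[0] fails).
def Pre_format_intext_journal (authors : List String) (year : Int) : Prop :=
  authors ≠ [] ∧ ∀ a ∈ authors, PySem.Str.split₀ a ≠ []
instance (authors : List String) (year : Int) : Decidable (Pre_format_intext_journal authors year) := by
  unfold Pre_format_intext_journal; infer_instance
def pvWitness_format_intext_journal : List String × Int := (["Smith, J.", "Doe A"], 2020)


def Spec_format_intext_journal (authors : List String) (year : Int) (out : String) : Prop :=
  out = format_intext_journal_alt authors year
instance (authors : List String) (year : Int) (out : String) : Decidable (Spec_format_intext_journal authors year out) := by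
  unfold Spec_format_intext_journal; infer_instance

-- ===== CLAIM =====
def Claim_equal_format_intext_journal : Prop :=
  ∀ (authors : List String) (year : Int), Dom_format_intext_journal authors year →
    Pre_format_intext_journal authors year →
    Spec_format_intext_journal authors year (format_intext_journal authors year)


-- ===== LEMMAS AND PROOFS =====

-- ===== VERDICT =====
theorem format_intext_journal_spec : Claim_equal_format_intext_journal := by
  intro authors year _ hpre
  unfold Spec_format_intext_journal
  match authors with
  | [] => exact absurd rfl hpre.1
  | [a] =>
      simp [format_intext_journal, format_intext_journal_alt, pvBodyB, pvSurnameB,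
        PySem.List.pyGet?, PySem.List.pyIdx?]
  | [a, b] =>
      simp [format_intext_journal, format_intext_journal_alt, pvBodyB, pvSurnameB,
        PySem.List.pyGet?, PySem.List.pyIdx?, String.append_assoc]
  | [a, b, c] =>
      simp [format_intext_journal, format_intext_journal_alt, pvBodyB, pvSurnameB,
        PySem.List.pyGet?, PySem.List.pyIdx?, String.append_assoc]
  | a :: b :: c :: d :: rest =>
      have h0 : (0:Int) ≤ (rest.length:Int) + 1 + 1 + 1 := by positivity
      simp [format_intext_journal, format_intext_journal_alt, pvSurnameB,
        PySem.List.pyGet?, PySem.List.pyIdx?, h0]
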